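-- pv_equiv track=rewrite | github.com/Bingkun-Huang/unicomp | scripts/waypoints_block_pushing.py | _build_disk_offsets
-- ===== SOURCE A (Python) =====
-- def _build_disk_offsets(r_cells: int):
--     offs = []
--     rr2 = int(r_cells) * int(r_cells)
--     for dx in range(-r_cells, r_cells + 1):
--         for dy in range(-r_cells, r_cells + 1):
--             if dx*dx + dy*dy <= rr2:
--                 offs.append((dx, dy))
--     return offs
-- ===== SOURCE B (Python) =====
-- def _build_disk_offsets(r_cells: int):
--     offs = []
--     rr2 = int(r_cells) * int(r_cells)
--     for dx in range(-r_cells, r_cells + 1):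
--         s = rr2 - dx * dx
--         m = r_cells
--         while m * m > s:
--             m -= 1
--         for dy in range(-m, m + 1):
--             offs.append((dx, dy))
--     return offs
-- ===== Notes on version B (the rewrite author's own statement) =====
-- stated objective: alternative
-- what changed: Replaces the per-cell membership test over the full (2r+1)x(2r+1) box by computing, for each column dx, the exact vertical half-extent m = floor(sqrt(r^2-dx^2)) via a descending scan, then emitting the column range(-m, m+1) directly.
import Mathlib
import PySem

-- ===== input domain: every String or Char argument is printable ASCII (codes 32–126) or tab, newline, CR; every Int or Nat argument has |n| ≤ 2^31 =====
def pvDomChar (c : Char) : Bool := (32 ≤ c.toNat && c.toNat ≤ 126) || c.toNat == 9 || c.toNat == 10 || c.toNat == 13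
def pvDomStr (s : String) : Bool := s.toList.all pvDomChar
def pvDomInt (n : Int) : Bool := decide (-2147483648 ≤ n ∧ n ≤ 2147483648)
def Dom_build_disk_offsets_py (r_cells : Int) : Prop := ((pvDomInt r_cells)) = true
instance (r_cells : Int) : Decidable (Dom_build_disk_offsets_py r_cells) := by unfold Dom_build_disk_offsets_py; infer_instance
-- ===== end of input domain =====

-- B replaces A's per-cell membership test by computing each column's exact
-- vertical half-extent with a descending scan (objective: alternative algorithm).

-- ===== PORT A =====
def build_disk_offsets_py (r_cells : Int) : List (Int × Int) :=
  let rr2 := r_cells * r_cells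
  (PySem.List.pyRange (-r_cells) (r_cells + 1) 1).foldl (fun offs dx =>
    (PySem.List.pyRange (-r_cells) (r_cells + 1) 1).foldl (fun o dy =>
      if dx * dx + dy * dy ≤ rr2 then o ++ [(dx, dy)] else o) offs) []

-- ===== PORT B =====
-- the 'while m*m > s: m -= 1' loop starting at m = r_cells ≥ 0; the m = 0 case
-- is the loop's exit for s ≥ 0 (which holds whenever the loop body runs)
def pvDescend : Nat → Int → Int
  | 0, _ => 0
  | (n+1), s => if ((n : Int) + 1) * ((n : Int) + 1) > s then pvDescend n s else (n : Int) + 1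

def build_disk_offsets_py_alt (r_cells : Int) : List (Int × Int) :=
  let rr2 := r_cells * r_cells
  (PySem.List.pyRange (-r_cells) (r_cells + 1) 1).foldl (fun offs dx =>
    let s := rr2 - dx * dx
    let m := pvDescend r_cells.toNat s
    (PySem.List.pyRange (-m) (m + 1) 1).foldl (fun o dy => o ++ [(dx, dy)]) offs) []

-- ===== PRECONDITION & SPEC =====
def Spec_build_disk_offsets_py (r_cells : Int) (out : List (Int × Int)) : Prop := out = build_disk_offsets_py_alt r_cells
instance (r_cells : Int) (out : List (Int × Int)) : Decidable (Spec_build_disk_offsets_py r_cells out) := by unfold Spec_build_disk_offsets_py; infer_instance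

-- ===== CLAIM (what is proved, stated in full; the proofs are below) =====
def Claim_equal_build_disk_offsets_py : Prop := ∀ (r_cells : Int), Dom_build_disk_offsets_py r_cells → Spec_build_disk_offsets_py r_cells (build_disk_offsets_py r_cells)

-- ===== LEMMAS AND PROOFS =====

-- pvDescend n s is the greatest m in [0, n] with m*m ≤ s, provided 0 ≤ s
theorem pvDescend_props (n : Nat) (s : Int) (hs : 0 ≤ s) :
    0 ≤ pvDescend n s ∧ pvDescend n s ≤ (n : Int) ∧
    pvDescend n s * pvDescend n s ≤ s ∧
    (pvDescend n s < (n : Int) → (pvDescend n s + 1) * (pvDescend n s + 1) > s) := by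
  induction n with
  | zero => simp [pvDescend]; omega
  | succ n ih =>
    simp only [pvDescend]
    split
    · rename_i h
      refine ⟨ih.1, ?_, ih.2.2.1, ?_⟩
      · have := ih.2.1; push_cast; omega
      · intro _
        rcases lt_or_ge (pvDescend n s) (n : Int) with h' | h'
        · exact ih.2.2.2 h'
        · have : pvDescend n s = (n : Int) := le_antisymm ih.2.1 h'
          rw [this]; exact h
    · rename_i h
      push_cast
      refine ⟨by positivity, le_refl _, by omega, by omega⟩

theorem inner_eq (r dx : Int) (hr : 0 ≤ r) (hdx1 : -r ≤ dx) (hdx2 : dx < r + 1) :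
    (PySem.List.pyRange (-r) (r + 1) 1).filter (fun dy => decide (dx * dx + dy * dy ≤ r * r))
      = PySem.List.pyRange (-(pvDescend r.toNat (r * r - dx * dx))) (pvDescend r.toNat (r * r - dx * dx) + 1) 1 := by
  set s : Int := r * r - dx * dx with hsdef
  have hs : 0 ≤ s := by nlinarith
  obtain ⟨hm0, hmn, hmsq, hmstep⟩ := pvDescend_props r.toNat s hs
  set m : Int := pvDescend r.toNat s with hmdef
  have hmr : m ≤ r := by rwa [Int.toNat_of_nonneg hr] at hmn
  -- the test dx² + dy² ≤ r² is, for dy in the scanned range, exactly -m ≤ dy ≤ m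
  have key : ∀ dy : Int, -r ≤ dy → dy < r + 1 → ((dx * dx + dy * dy ≤ r * r) ↔ (-m ≤ dy ∧ dy ≤ m)) := by
    intro dy h1 h2
    constructor
    · intro h
      have hdys : dy * dy ≤ s := by omega
      rcases lt_or_ge m r with hlt | hge
      · have hstep : (m + 1) * (m + 1) > s := by
          apply hmstep; rwa [Int.toNat_of_nonneg hr]
        have : dy * dy < (m + 1) * (m + 1) := by omega
        constructor <;> nlinarith
      · have hmr' : m = r := le_antisymm hmr hge
        constructor <;> omega
    · intro ⟨h1', h2'⟩
      have : dy * dy ≤ m * m := by nlinarith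
      omega
  -- split the scanned range at -m and m+1
  have hsplit1 : (-r : Int) ≤ -m := by omega
  have hsplit2 : -m ≤ m + 1 := by omega
  have hsplit3 : m + 1 ≤ r + 1 := by omega
  rw [PySem.List.pyRange_one_append (-r) (-m) (r+1) hsplit1 (by omega),
      PySem.List.pyRange_one_append (-m) (m+1) (r+1) hsplit2 hsplit3,
      List.filter_append, List.filter_append]
  have hleft : (PySem.List.pyRange (-r) (-m) 1).filter (fun dy => decide (dx * dx + dy * dy ≤ r * r)) = [] := by
    rw [List.filter_eq_nil_iff]
    intro dy hdy
    rw [PySem.List.mem_pyRange_one] at hdy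
    simp only [decide_eq_true_eq]
    intro hcontra
    have := (key dy hdy.1 (by omega)).1 hcontra
    omega
  have hmid : (PySem.List.pyRange (-m) (m+1) 1).filter (fun dy => decide (dx * dx + dy * dy ≤ r * r)) = PySem.List.pyRange (-m) (m+1) 1 := by
    rw [List.filter_eq_self]
    intro dy hdy
    rw [PySem.List.mem_pyRange_one] at hdy
    simp only [decide_eq_true_eq]
    exact (key dy (by omega) (by omega)).2 ⟨hdy.1, by omega⟩
  have hright : (PySem.List.pyRange (m+1) (r+1) 1).filter (fun dy => decide (dx * dx + dy * dy ≤ r * r)) = [] := by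
    rw [List.filter_eq_nil_iff]
    intro dy hdy
    rw [PySem.List.mem_pyRange_one] at hdy
    simp only [decide_eq_true_eq]
    intro hcontra
    have := (key dy (by omega) hdy.2).1 hcontra
    omega
  rw [hleft, hmid, hright, List.nil_append, List.append_nil]

-- ===== VERDICT (by name: the statement is the Claim_ definition above) =====
theorem build_disk_offsets_py_spec : Claim_equal_build_disk_offsets_py := by
  intro r _
  unfold Spec_build_disk_offsets_py build_disk_offsets_py build_disk_offsets_py_alt
  simp only []
  apply PySem.List.foldl_congr_mem
  intro acc dx hdx
  rw [PySem.List.mem_pyRange_one] at hdx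
  have hr : 0 ≤ r := by omega
  rw [PySem.List.foldl_append_ite (fun dy => dx * dx + dy * dy ≤ r * r) (fun dy => (dx, dy)),
      PySem.List.foldl_append_singleton_eq_map,
      inner_eq r dx hr hdx.1 hdx.2]
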